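-- pv_equiv track=rewrite | github.com/isLinXu/CVProcessLib | utils/ListHelper.py | listEndPop
-- ===== SOURCE A (Python) =====
-- def listEndPop(strlist, str):
--     """list末尾连续删除str"""
--     """
--         输入 list = ['1','','2','','']
--         输出 list = ['1','','2']
--     """
--     nstrlist = strlist.copy()
--     length = len(nstrlist)
--     for item in range(length - 1, -1, -1):
--         if nstrlist[item] == str:
--             nstrlist.pop()
--         else:
--             break
--     return nstrlist
-- ===== SOURCE B (Python) =====
-- from itertools import dropwhile
--
-- def listEndPop(strlist, str):
--     """list末尾连续删除str — reversed view + dropwhile, no mutation/pop loop."""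
--     return list(dropwhile(lambda x: x == str, reversed(strlist)))[::-1]
-- ===== Notes on version B (the rewrite author's own statement) =====
-- stated objective: idiomatic
-- what changed: Replaces the copy-then-index-countdown-with-pop mutation loop by a single functional pass: dropwhile over the reversed list removes the trailing run, then the remainder is reversed back.
import Mathlib
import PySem

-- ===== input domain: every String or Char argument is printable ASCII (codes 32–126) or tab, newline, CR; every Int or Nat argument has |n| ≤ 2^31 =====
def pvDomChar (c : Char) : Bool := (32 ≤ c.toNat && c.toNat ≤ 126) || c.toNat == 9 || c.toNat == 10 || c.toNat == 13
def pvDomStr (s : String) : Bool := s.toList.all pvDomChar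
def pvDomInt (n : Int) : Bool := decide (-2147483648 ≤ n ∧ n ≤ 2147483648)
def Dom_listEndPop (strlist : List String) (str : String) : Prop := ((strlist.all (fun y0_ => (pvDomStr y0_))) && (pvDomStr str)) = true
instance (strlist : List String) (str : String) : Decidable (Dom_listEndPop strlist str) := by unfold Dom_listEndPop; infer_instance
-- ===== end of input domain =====

-- B replaces A's copy-then-countdown-pop mutation loop by a one-pass reversed dropwhile, reversed back (idiomatic; return value only).


-- ===== PORT A =====
-- the for-loop over range(length-1, -1, -1) with mutable nstrlist; pop() drops the last element.
-- pyGet? never returns none here (the index stays in range); the none branch is unreachable.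
def listEndPopGoA (str : String) : List String → List Int → List String
  | nstrlist, [] => nstrlist
  | nstrlist, item :: rest =>
    match PySem.List.pyGet? nstrlist item with
    | some v => if v == str then listEndPopGoA str nstrlist.dropLast rest else nstrlist
    | none => nstrlist

def listEndPop (strlist : List String) (str : String) : List String :=
  let nstrlist := strlist
  let length : Int := nstrlist.length
  listEndPopGoA str nstrlist (PySem.List.pyRange (length - 1) (-1) (-1))

-- ===== PORT B =====
def listEndPop_alt (strlist : List String) (str : String) : List String :=
  ((strlist.reverse.dropWhile (fun x => x == str)).reverse)

-- ===== PRECONDITION & SPEC =====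
def Spec_listEndPop (strlist : List String) (str : String) (out : List String) : Prop := out = listEndPop_alt strlist str
instance (strlist : List String) (str : String) (out : List String) : Decidable (Spec_listEndPop strlist str out) := by unfold Spec_listEndPop; infer_instance

-- ===== CLAIM (what is proved, stated in full; the proofs are below) =====
def Claim_equal_listEndPop : Prop := ∀ (strlist : List String) (str : String), Dom_listEndPop strlist str → Spec_listEndPop strlist str (listEndPop strlist str)

-- ===== LEMMAS AND PROOFS =====
theorem listEndPopGoA_reverse (str : String) (r : List String) :
    listEndPopGoA str r.reverse (PySem.List.pyRange ((r.length : Int) - 1) (-1) (-1))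
      = (r.dropWhile (fun x => x == str)).reverse := by
  induction r with
  | nil => simp [listEndPopGoA, PySem.List.pyRange_neg_one_eq_nil]
  | cons x xs ih =>
    have hlen : ((x :: xs).length : Int) - 1 = (xs.length : Int) := by
      simp
    rw [hlen, PySem.List.pyRange_neg_one_cons (by omega)]
    have hrev : (x :: xs).reverse = xs.reverse ++ [x] := by simp
    rw [hrev]
    have hget : PySem.List.pyGet? (xs.reverse ++ [x]) (xs.length : Int) = some x := by
      have h0 := PySem.List.pyGet?_append_length (pre := xs.reverse) (y := x) (ys := ([] : List String))
      simpa using h0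
    simp only [listEndPopGoA, hget]
    by_cases h : x == str
    · simp only [h, if_pos]
      have hdl : (xs.reverse ++ [x]).dropLast = xs.reverse := by simp
      rw [hdl]
      simpa [List.dropWhile, h] using ih
    · simp [h, List.dropWhile]

-- ===== VERDICT (by name: the statement is the Claim_ definition above) =====
theorem listEndPop_spec : Claim_equal_listEndPop := by
  intro strlist str _
  unfold Spec_listEndPop listEndPop listEndPop_alt
  have := listEndPopGoA_reverse str strlist.reverse
  simpa using this
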